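-- pv_equiv track=rewrite | github.com/ZhouningMan/LeetCodePython | unionfind/SetUnion.py | setUnion
-- ===== SOURCE A (Python) =====
-- class UnionFind:
--     def __init__(self):
--         self.parent = {}
--         self.size = 0
--
--     def add(self, key):
--         if key not in self.parent:
--             self.parent[key] = key
--             self.size += 1
--
--     def union(self, key1, key2):
--         p1 = self.find(key1)
--         p2 = self.find(key2)
--         if p1 != p2:
--             self.parent[p1] = p2
--             self.size -= 1
--
--     def find(self, key):
--         while key != self.parent[key]:
--             self.parent[key] = self.parent[self.parent[key]]
--             key = self.parent[key]
--         return key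
--
-- def setUnion(sets):
--     uf = UnionFind()
--     for nums in sets:
--         for num in nums:
--             uf.add(num)
--         for i in range(1, len(nums)):
--             uf.union(nums[i], nums[i-1])
--     union_by_parent = {}
--     for nums in sets:
--         for num in nums:
--             parent = uf.find(num)
--             if parent not in union_by_parent:
--                 union_by_parent[parent] = set()
--             union_by_parent[parent].add(num)
--     return uf.size
-- ===== SOURCE B (Python) =====
-- def setUnion(sets):
--     # Eager relabeling: give every distinct number a component label, merge
--     # labels for consecutive members of a group, count distinct labels.
--     label = {}
--     fresh = 0
--     for nums in sets:
--         for num in nums: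
--             if num not in label:
--                 label[num] = fresh
--                 fresh += 1
--         for i in range(1, len(nums)):
--             a, b = label[nums[i]], label[nums[i - 1]]
--             if a != b:
--                 label = {k: (b if v == a else v) for k, v in label.items()}
--     return len(set(label.values()))
-- ===== Notes on version B (the rewrite author's own statement) =====
-- stated objective: simpler
-- what changed: Replaces the union-find forest (parent pointers, path-halving find, maintained size counter, dead union_by_parent pass) by eager label relabeling: each distinct number gets a component label, a merge rewrites one label into the other across the dict, and the answer is the number of distinct labels.
import Mathlib
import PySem

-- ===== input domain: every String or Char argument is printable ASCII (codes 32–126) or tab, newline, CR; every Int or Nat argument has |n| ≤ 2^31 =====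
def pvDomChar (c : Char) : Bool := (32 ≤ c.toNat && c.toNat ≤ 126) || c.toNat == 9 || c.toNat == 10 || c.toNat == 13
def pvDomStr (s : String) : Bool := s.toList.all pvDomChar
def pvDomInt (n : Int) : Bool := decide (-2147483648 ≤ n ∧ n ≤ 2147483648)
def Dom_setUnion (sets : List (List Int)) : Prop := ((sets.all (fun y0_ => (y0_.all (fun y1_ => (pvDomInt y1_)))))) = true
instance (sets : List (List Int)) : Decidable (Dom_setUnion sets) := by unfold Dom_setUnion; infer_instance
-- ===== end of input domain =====

-- B replaces the union-find forest of A by eager label relabeling (one label per number,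
-- merges rewrite a label across the dict, answer = number of distinct labels): simpler, not faster.


-- ===== PORT A =====
-- Union-find with path halving, as in the Python class UnionFind.

-- parent[k]; in setUnion every key is inserted before it is looked up, so the default is never used
def pvPget (p : PySem.Dict Int Int) (k : Int) : Int := p.getD k k

-- 'while key != self.parent[key]: self.parent[key] = self.parent[self.parent[key]]; key = self.parent[key]'
-- fuel: on the states setUnion reaches the loop terminates within (number of keys)+1 iterations
def pvFindGo (p : PySem.Dict Int Int) (key : Int) : Nat → PySem.Dict Int Int × Int
  | 0 => (p, key)
  | fuel + 1 =>
    if key ≠ pvPget p key then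
      let p' := p.insert key (pvPget p (pvPget p key))
      pvFindGo p' (pvPget p' key) fuel
    else (p, key)

def pvFind (p : PySem.Dict Int Int) (key : Int) : PySem.Dict Int Int × Int :=
  pvFindGo p key (p.items.length + 1)

def pvAdd (st : PySem.Dict Int Int × Int) (key : Int) : PySem.Dict Int Int × Int :=
  if ¬ st.1.contains key then (st.1.insert key key, st.2 + 1) else st

def pvUnion (st : PySem.Dict Int Int × Int) (key1 key2 : Int) : PySem.Dict Int Int × Int :=
  let f1 := pvFind st.1 key1
  let f2 := pvFind f1.1 key2
  if f1.2 ≠ f2.2 then (f2.1.insert f1.2 f2.2, st.2 - 1) else (f2.1, st.2)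

def setUnion (sets : List (List Int)) : Int :=
  let st := sets.foldl (fun st nums =>
      let st1 := nums.foldl pvAdd st
      (PySem.List.pyRange 1 (nums.length : Int) 1).foldl
        (fun st i => pvUnion st (PySem.List.pyGetD nums i 0) (PySem.List.pyGetD nums (i - 1) 0)) st1)
    (PySem.Dict.empty, 0)
  -- second Python loop: builds union_by_parent (and compresses parent via find); unused for the result
  let _ubp := sets.foldl (fun (q : PySem.Dict Int Int × PySem.Dict Int (PySem.Set Int)) nums =>
      nums.foldl (fun q num =>
        let f := pvFind q.1 num
        (f.1, q.2.modify f.2 PySem.Set.empty (fun s => PySem.Set.add s num))) q)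
    (st.1, PySem.Dict.empty)
  st.2

-- ===== PORT B =====
-- Eager relabeling: every distinct number gets a component label, labels are merged
-- by rewriting, the answer is the number of distinct labels.

-- 'label = {k: (b if v == a else v) for k, v in label.items()}'
def pvRelabel (lab : PySem.Dict Int Int) (a b : Int) : PySem.Dict Int Int :=
  PySem.Dict.mk (lab.items.map (fun kv => (kv.1, if kv.2 = a then b else kv.2)))

def setUnion_alt (sets : List (List Int)) : Int :=
  let st := sets.foldl (fun (st : PySem.Dict Int Int × Int) nums =>
      let st1 := nums.foldl (fun st num =>
          if ¬ st.1.contains num then (st.1.insert num st.2, st.2 + 1) else st) st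
      (PySem.List.pyRange 1 (nums.length : Int) 1).foldl (fun st i =>
          -- label[nums[i]], label[nums[i-1]]: keys are present, the getD default is never used
          let a := st.1.getD (PySem.List.pyGetD nums i 0) 0
          let b := st.1.getD (PySem.List.pyGetD nums (i - 1) 0) 0
          if a ≠ b then (pvRelabel st.1 a b, st.2) else st) st1)
    (PySem.Dict.empty, 0)
  ((PySem.Set.ofList st.1.values).length : Int)

-- ===== PRECONDITION & SPEC =====
def Spec_setUnion (sets : List (List Int)) (out : Int) : Prop := out = setUnion_alt sets
instance (sets : List (List Int)) (out : Int) : Decidable (Spec_setUnion sets out) := by unfold Spec_setUnion; infer_instance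

-- ===== CLAIM (what is proved, stated in full; the proofs are below) =====
def Claim_equal_setUnion : Prop := ∀ (sets : List (List Int)), Dom_setUnion sets → Spec_setUnion sets (setUnion sets)

-- ===== LEMMAS AND PROOFS =====

-- ===== root theory =====
def IsRoot (p : PySem.Dict Int Int) (r : Int) : Prop := pvPget p r = r

def RootsTo (p : PySem.Dict Int Int) (k r : Int) : Prop :=
  ∃ n : Nat, (pvPget p)^[n] k = r ∧ IsRoot p r

def SameRoot (p : PySem.Dict Int Int) (x y : Int) : Prop :=
  ∃ r, RootsTo p x r ∧ RootsTo p y r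

def NoCycle (p : PySem.Dict Int Int) : Prop :=
  ∀ (k : Int) (n : Nat), 0 < n → (pvPget p)^[n] k = k → IsRoot p k

def ValsKeys (p : PySem.Dict Int Int) : Prop :=
  ∀ k ∈ p.keys, pvPget p k ∈ p.keys

theorem iter_root {p : PySem.Dict Int Int} {r : Int} (h : IsRoot p r) :
    ∀ n : Nat, (pvPget p)^[n] r = r := by
  intro n; induction n with
  | zero => rfl
  | succ n ih => rw [Function.iterate_succ_apply, h, ih]

theorem rootsTo_of_iter {p : PySem.Dict Int Int} {k r : Int} {m : Nat}
    (h : RootsTo p ((pvPget p)^[m] k) r) : RootsTo p k r := by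
  obtain ⟨n, hn, hr⟩ := h
  exact ⟨m + n, by rw [Nat.add_comm, Function.iterate_add_apply, hn], hr⟩

theorem rootsTo_step {p : PySem.Dict Int Int} {k r : Int}
    (h : RootsTo p (pvPget p k) r) : RootsTo p k r := by
  exact rootsTo_of_iter (m := 1) (by simpa using h)

theorem rootsTo_unique {p : PySem.Dict Int Int} {k r s : Int}
    (h1 : RootsTo p k r) (h2 : RootsTo p k s) : r = s := by
  obtain ⟨n, hn, hr⟩ := h1
  obtain ⟨m, hm, hs⟩ := h2
  rcases Nat.le_total n m with h | h
  · obtain ⟨c, rfl⟩ := Nat.exists_eq_add_of_le h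
    rw [Nat.add_comm, Function.iterate_add_apply, hn, iter_root hr] at hm
    exact hm
  · obtain ⟨c, rfl⟩ := Nat.exists_eq_add_of_le h
    rw [Nat.add_comm, Function.iterate_add_apply, hm, iter_root hs] at hn
    exact hn.symm

theorem sameRoot_iff_of_rootsTo {p : PySem.Dict Int Int} {x y rx ry : Int}
    (hx : RootsTo p x rx) (hy : RootsTo p y ry) : SameRoot p x y ↔ rx = ry := by
  constructor
  · rintro ⟨r, hr1, hr2⟩
    rw [rootsTo_unique hx hr1, rootsTo_unique hy hr2]
  · rintro rfl; exact ⟨rx, hx, hy⟩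

theorem pget_not_mem {p : PySem.Dict Int Int} {k : Int} (h : k ∉ p.keys) :
    pvPget p k = k := by
  have hc : p.contains k = false := by
    cases hc : p.contains k
    · rfl
    · exact absurd ((PySem.Dict.contains_iff_mem_keys p k).1 hc) h
  simpa [pvPget] using PySem.Dict.getD_of_not_contains p k hc

theorem mem_of_pget_ne {p : PySem.Dict Int Int} {k : Int} (h : pvPget p k ≠ k) :
    k ∈ p.keys := by
  by_contra hk; exact h (pget_not_mem hk)

theorem iter_mem_keys {p : PySem.Dict Int Int} (hv : ValsKeys p) {k : Int}
    (hk : k ∈ p.keys) : ∀ n : Nat, (pvPget p)^[n] k ∈ p.keys := by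
  intro n; induction n with
  | zero => exact hk
  | succ n ih => rw [Function.iterate_succ_apply']; exact hv _ ih

theorem exists_root {p : PySem.Dict Int Int} (hnc : NoCycle p) (hv : ValsKeys p)
    (k : Int) : ∃ n ≤ p.keys.length, IsRoot p ((pvPget p)^[n] k) := by
  by_cases hk : k ∈ p.keys
  · by_cases hall : ∃ n ≤ p.keys.length, IsRoot p ((pvPget p)^[n] k)
    · exact hall
    · exfalso
      push Not at hall
      -- pigeonhole on the first keys.length + 1 iterates
      have hmap : ∀ i : Fin (p.keys.length + 1),
          (pvPget p)^[(i : Nat)] k ∈ p.keys.toFinset := by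
        intro i; simpa using iter_mem_keys hv hk i
      have hcard : p.keys.toFinset.card < (Finset.univ : Finset (Fin (p.keys.length + 1))).card := by
        have := List.toFinset_card_le p.keys
        simp only [Finset.card_univ, Fintype.card_fin]
        omega
      obtain ⟨i, -, j, -, hij, heq⟩ :=
        Finset.exists_ne_map_eq_of_card_lt_of_maps_to hcard (fun i _ => hmap i)
      -- wlog i < j
      rcases Nat.lt_or_ge (i : Nat) (j : Nat) with hlt | hge
      · have hcyc : (pvPget p)^[(j : Nat) - (i : Nat)] ((pvPget p)^[(i : Nat)] k)
            = (pvPget p)^[(i : Nat)] k := by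
          rw [← Function.iterate_add_apply]
          rw [Nat.sub_add_cancel (Nat.le_of_lt hlt)]
          exact heq.symm
        have hroot := hnc _ _ (by omega) hcyc
        exact hall (i : Nat) (by omega) hroot
      · have hlt2 : (j : Nat) < (i : Nat) := by
          rcases Nat.lt_or_ge (j : Nat) (i : Nat) with h | h
          · exact h
          · exact absurd (Fin.ext (Nat.le_antisymm h hge)) hij
        have hcyc : (pvPget p)^[(i : Nat) - (j : Nat)] ((pvPget p)^[(j : Nat)] k)
            = (pvPget p)^[(j : Nat)] k := by
          rw [← Function.iterate_add_apply]
          rw [Nat.sub_add_cancel (Nat.le_of_lt hlt2)]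
          exact heq
        have hroot := hnc _ _ (by omega) hcyc
        exact hall (j : Nat) (by omega) hroot
  · exact ⟨0, Nat.zero_le _, by simpa [IsRoot] using pget_not_mem hk⟩

theorem rootsTo_total {p : PySem.Dict Int Int} (hnc : NoCycle p) (hv : ValsKeys p)
    (x : Int) : ∃ r, RootsTo p x r := by
  obtain ⟨n, -, hr⟩ := exists_root hnc hv x
  exact ⟨_, ⟨n, rfl, hr⟩⟩

theorem noCycle_of_rooted {p : PySem.Dict Int Int}
    (h : ∀ x, ∃ r, RootsTo p x r) : NoCycle p := by
  intro k n hn hcyc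
  obtain ⟨r, m, hm, hr⟩ := h k
  have hmul : ∀ t : Nat, (pvPget p)^[n * t] k = k := by
    intro t; induction t with
    | zero => rfl
    | succ t ih => rw [Nat.mul_succ, Function.iterate_add_apply, hcyc, ih]
  have hbig : (pvPget p)^[n * m] k = r := by
    have h1 : m ≤ n * m := Nat.le_mul_of_pos_left m hn
    obtain ⟨c, hc⟩ := Nat.exists_eq_add_of_le h1
    rw [hc, Nat.add_comm, Function.iterate_add_apply, hm, iter_root hr]
  have : k = r := by rw [← hmul m, hbig]
  rw [this]; exact hr

-- ===== path-halving step =====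
-- p' := p.insert key (pvPget p (pvPget p key)), for a non-root key

theorem pget_halve {p : PySem.Dict Int Int} {key : Int} (x : Int) :
    pvPget (p.insert key (pvPget p (pvPget p key))) x
      = if x = key then pvPget p (pvPget p key) else pvPget p x := by
  simp [pvPget, PySem.Dict.getD_insert]

theorem keys_halve {p : PySem.Dict Int Int} {key : Int}
    (h : pvPget p key ≠ key) :
    (p.insert key (pvPget p (pvPget p key))).keys = p.keys := by
  apply PySem.Dict.keys_insert_of_contains
  exact (PySem.Dict.contains_iff_mem_keys p key).2 (mem_of_pget_ne h)

theorem isRoot_halve {p : PySem.Dict Int Int} {key : Int}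
    (hnc : NoCycle p) (h : pvPget p key ≠ key) (x : Int) :
    IsRoot (p.insert key (pvPget p (pvPget p key))) x ↔ IsRoot p x := by
  by_cases hx : x = key
  · subst hx
    constructor
    · intro hr
      rw [IsRoot, pget_halve, if_pos rfl] at hr
      have hcyc : (pvPget p)^[2] x = x := by simpa using hr
      exact hnc _ 2 (by omega) hcyc
    · intro hr; exact absurd hr h
  · rw [IsRoot, IsRoot, pget_halve, if_neg hx]

theorem rootsTo_halve_forward {p : PySem.Dict Int Int} {key : Int}
    (hnc : NoCycle p) (h : pvPget p key ≠ key) {x r : Int}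
    (hx : RootsTo p x r) : RootsTo (p.insert key (pvPget p (pvPget p key))) x r := by
  obtain ⟨n, hn, hr⟩ := hx
  induction n using Nat.strong_induction_on generalizing x with
  | _ n ih =>
    by_cases hroot : IsRoot p x
    · have : x = r := by rw [← hn, iter_root hroot]
      subst this
      exact ⟨0, rfl, (isRoot_halve hnc h _).2 hr⟩
    · have hn1 : n ≠ 0 := by
        rintro rfl; simp only [Function.iterate_zero, id_eq] at hn; exact hroot (by rw [IsRoot, hn]; exact hr)
      by_cases hxk : x = key
      · subst hxk
        -- next p'-step is pvPget p (pvPget p x)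
        rcases Nat.lt_or_ge n 2 with h2 | h2
        · -- n = 1 : pvPget p x is the root r
          have hn' : n = 1 := by omega
          subst hn'
          have hpr : pvPget p x = r := by simpa using hn
          have : pvPget p (pvPget p x) = r := by rw [hpr]; exact hr
          apply rootsTo_step
          rw [pget_halve, if_pos rfl]
          exact ⟨0, by simpa using this, (isRoot_halve hnc h _).2 hr⟩
        · -- n ≥ 2
          have hn2 : (pvPget p)^[n - 2] (pvPget p (pvPget p x)) = r := by
            have : (pvPget p)^[n - 2] ((pvPget p)^[2] x) = r := by
              rw [← Function.iterate_add_apply]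
              have : n - 2 + 2 = n := by omega
              rw [this, hn]
            simpa [Function.iterate_succ_apply] using this
          have := ih (n - 2) (by omega) hn2
          apply rootsTo_step
          rwa [pget_halve, if_pos rfl]
      · have hn2 : (pvPget p)^[n - 1] (pvPget p x) = r := by
          have : (pvPget p)^[n - 1] ((pvPget p)^[1] x) = r := by
            rw [← Function.iterate_add_apply]
            have : n - 1 + 1 = n := by omega
            rw [this, hn]
          simpa using this
        have := ih (n - 1) (by omega) hn2
        apply rootsTo_step
        rwa [pget_halve, if_neg hxk]

theorem rootsTo_halve_iff {p : PySem.Dict Int Int} {key : Int}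
    (hnc : NoCycle p) (hv : ValsKeys p) (h : pvPget p key ≠ key) (x r : Int) :
    RootsTo (p.insert key (pvPget p (pvPget p key))) x r ↔ RootsTo p x r := by
  constructor
  · intro h'
    obtain ⟨r0, hr0⟩ := rootsTo_total hnc hv x
    have := rootsTo_halve_forward hnc h hr0
    rw [rootsTo_unique h' this]
    exact hr0
  · exact rootsTo_halve_forward hnc h

theorem noCycle_halve {p : PySem.Dict Int Int} {key : Int}
    (hnc : NoCycle p) (hv : ValsKeys p) (h : pvPget p key ≠ key) :
    NoCycle (p.insert key (pvPget p (pvPget p key))) := by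
  apply noCycle_of_rooted
  intro x
  obtain ⟨r0, hr0⟩ := rootsTo_total hnc hv x
  exact ⟨r0, rootsTo_halve_forward hnc h hr0⟩

theorem valsKeys_halve {p : PySem.Dict Int Int} {key : Int}
    (hv : ValsKeys p) (h : pvPget p key ≠ key) :
    ValsKeys (p.insert key (pvPget p (pvPget p key))) := by
  intro k hk
  rw [keys_halve h] at hk ⊢
  rw [pget_halve]
  split
  · next heq =>
    subst heq
    exact hv _ (hv _ hk)
  · exact hv _ hk

theorem root_dist_mono {p : PySem.Dict Int Int} {key : Int}
    (hnc : NoCycle p) (h : pvPget p key ≠ key) :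
    ∀ (e : Nat) (x : Int), IsRoot p ((pvPget p)^[e] x) →
      ∃ e' ≤ e, IsRoot (p.insert key (pvPget p (pvPget p key))) ((pvPget (p.insert key (pvPget p (pvPget p key))))^[e'] x) := by
  intro e
  induction e using Nat.strong_induction_on with
  | _ e ih =>
    intro x hx
    by_cases hroot : IsRoot p x
    · exact ⟨0, Nat.zero_le _, by simpa using (isRoot_halve hnc h x).2 hroot⟩
    · have he : e ≠ 0 := by rintro rfl; exact hroot hx
      by_cases hxk : x = key
      · subst hxk
        rcases Nat.lt_or_ge e 2 with h2 | h2
        · -- e = 1: pvPget p x is a p-root, so is pvPget p (pvPget p x)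
          have he' : e = 1 := by omega
          subst he'
          have hr : IsRoot p (pvPget p x) := by simpa using hx
          have : IsRoot p (pvPget p (pvPget p x)) := by rw [hr]; exact hr
          refine ⟨1, le_refl _, ?_⟩
          have hstep : (pvPget (p.insert x (pvPget p (pvPget p x))))^[1] x
              = pvPget p (pvPget p x) := by
            simp [pget_halve]
          rw [hstep]
          exact (isRoot_halve hnc h _).2 this
        · -- e ≥ 2
          have hx2 : IsRoot p ((pvPget p)^[e - 2] (pvPget p (pvPget p x))) := by
            have h0 : (pvPget p)^[e - 2] ((pvPget p)^[2] x) = (pvPget p)^[e] x := by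
              rw [← Function.iterate_add_apply]
              congr 1; omega
            have : (pvPget p)^[2] x = pvPget p (pvPget p x) := by
              simp [Function.iterate_succ_apply]
            rw [← this, h0]; exact hx
          obtain ⟨e', he', hroot'⟩ := ih (e - 2) (by omega) _ hx2
          refine ⟨e' + 1, by omega, ?_⟩
          rw [Function.iterate_succ_apply]
          have hstep : pvPget (p.insert x (pvPget p (pvPget p x))) x
              = pvPget p (pvPget p x) := by simp [pget_halve]
          rwa [hstep]
      · have hx2 : IsRoot p ((pvPget p)^[e - 1] (pvPget p x)) := by
          have h0 : (pvPget p)^[e - 1] ((pvPget p)^[1] x) = (pvPget p)^[e] x := by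
            rw [← Function.iterate_add_apply]
            congr 1; omega
          simp only [Function.iterate_one] at h0
          rw [h0]; exact hx
        obtain ⟨e', he', hroot'⟩ := ih (e - 1) (by omega) _ hx2
        refine ⟨e' + 1, by omega, ?_⟩
        rw [Function.iterate_succ_apply]
        have hstep : pvPget (p.insert key (pvPget p (pvPget p key))) x
            = pvPget p x := by rw [pget_halve, if_neg hxk]
        rwa [hstep]

-- ===== find specification =====
theorem findGo_spec : ∀ (fuel : Nat) (p : PySem.Dict Int Int) (key : Int),
    NoCycle p → ValsKeys p → (∃ d ≤ fuel, IsRoot p ((pvPget p)^[d] key)) →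
    RootsTo p key (pvFindGo p key fuel).2 ∧
    (pvFindGo p key fuel).1.keys = p.keys ∧
    NoCycle (pvFindGo p key fuel).1 ∧
    ValsKeys (pvFindGo p key fuel).1 ∧
    (∀ x s, RootsTo (pvFindGo p key fuel).1 x s ↔ RootsTo p x s) := by
  intro fuel
  induction fuel with
  | zero =>
    intro p key hnc hv hd
    obtain ⟨d, hd0, hroot⟩ := hd
    have : d = 0 := by omega
    subst this
    simp only [Function.iterate_zero, id_eq] at hroot
    exact ⟨⟨0, rfl, hroot⟩, rfl, hnc, hv, fun _ _ => Iff.rfl⟩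
  | succ fuel ih =>
    intro p key hnc hv hd
    rw [pvFindGo]
    by_cases hne : key ≠ pvPget p key
    · rw [if_pos hne]
      have hne' : pvPget p key ≠ key := fun h => hne h.symm
      -- distance for the recursive call
      obtain ⟨d, hd0, hroot⟩ := hd
      have hd1 : d ≠ 0 := by
        rintro rfl
        simp only [Function.iterate_zero, id_eq] at hroot
        exact hne' hroot
      have hpdist : ∃ e ≤ fuel, IsRoot p ((pvPget p)^[e] (pvPget p (pvPget p key))) := by
        rcases Nat.lt_or_ge d 2 with h2 | h2
        · have : d = 1 := by omega
          subst this
          have hr : IsRoot p (pvPget p key) := by simpa using hroot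
          exact ⟨0, Nat.zero_le _, by simpa using (by rw [hr]; exact hr : IsRoot p (pvPget p (pvPget p key)))⟩
        · refine ⟨d - 2, by omega, ?_⟩
          have h0 : (pvPget p)^[d - 2] ((pvPget p)^[2] key) = (pvPget p)^[d] key := by
            rw [← Function.iterate_add_apply]; congr 1; omega
          have h1 : (pvPget p)^[2] key = pvPget p (pvPget p key) := by
            simp [Function.iterate_succ_apply]
          rw [← h1, h0]; exact hroot
      obtain ⟨e0, he0, hroot0⟩ := hpdist
      obtain ⟨e, he, hroote⟩ := root_dist_mono hnc hne' e0 _ hroot0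
      have hkey' : pvPget (p.insert key (pvPget p (pvPget p key))) key
          = pvPget p (pvPget p key) := by simp [pget_halve]
      have hIH := ih (p.insert key (pvPget p (pvPget p key)))
        (pvPget (p.insert key (pvPget p (pvPget p key))) key)
        (noCycle_halve hnc hv hne') (valsKeys_halve hv hne')
        ⟨e, by omega, by rw [hkey']; exact hroote⟩
      obtain ⟨hIH1, hIH2, hIH3, hIH4, hIH5⟩ := hIH
      refine ⟨?_, by rw [hIH2, keys_halve hne'], hIH3, hIH4, ?_⟩
      · -- RootsTo p key result
        have h1 : RootsTo (p.insert key (pvPget p (pvPget p key))) key _ :=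
          rootsTo_step hIH1
        have h2 := (rootsTo_halve_iff hnc hv hne' _ _).1 h1
        exact h2
      · intro x s
        rw [hIH5, rootsTo_halve_iff hnc hv hne']
    · rw [if_neg hne]
      push Not at hne
      exact ⟨⟨0, rfl, hne.symm⟩, rfl, hnc, hv, fun _ _ => Iff.rfl⟩

theorem find_spec (p : PySem.Dict Int Int) (key : Int)
    (hnc : NoCycle p) (hv : ValsKeys p) :
    RootsTo p key (pvFind p key).2 ∧
    (pvFind p key).1.keys = p.keys ∧
    NoCycle (pvFind p key).1 ∧
    ValsKeys (pvFind p key).1 ∧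
    (∀ x s, RootsTo (pvFind p key).1 x s ↔ RootsTo p x s) := by
  apply findGo_spec
  · exact hnc
  · exact hv
  · obtain ⟨d, hd, hroot⟩ := exists_root hnc hv key
    refine ⟨d, ?_, hroot⟩
    have : p.keys.length = p.items.length := by
      simp [PySem.Dict.keys]
    omega

-- ===== attaching one root under another (the effective branch of union) =====
theorem pget_attach {p : PySem.Dict Int Int} {r1 r2 : Int} (x : Int) :
    pvPget (p.insert r1 r2) x = if x = r1 then r2 else pvPget p x := by
  simp [pvPget, PySem.Dict.getD_insert]

theorem keys_attach {p : PySem.Dict Int Int} {r1 r2 : Int} (h : r1 ∈ p.keys) :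
    (p.insert r1 r2).keys = p.keys :=
  PySem.Dict.keys_insert_of_contains p r2 ((PySem.Dict.contains_iff_mem_keys p r1).2 h)

theorem rootsTo_attach_ne {p : PySem.Dict Int Int} {r1 r2 : Int}
    (hr1 : IsRoot p r1) {x r : Int} (hx : RootsTo p x r) (hne : r ≠ r1) :
    RootsTo (p.insert r1 r2) x r := by
  obtain ⟨n, hn, hr⟩ := hx
  induction n generalizing x with
  | zero =>
    simp only [Function.iterate_zero, id_eq] at hn
    subst hn
    refine ⟨0, rfl, ?_⟩
    rw [IsRoot, pget_attach, if_neg hne]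
    exact hr
  | succ n ih =>
    by_cases hxr : x = r1
    · subst hxr
      rw [iter_root hr1] at hn
      exact absurd hn.symm hne
    · apply rootsTo_step
      rw [pget_attach, if_neg hxr]
      exact ih (by rw [← Function.iterate_succ_apply]; exact hn)

theorem rootsTo_attach_r1 {p : PySem.Dict Int Int} {r1 r2 : Int}
    (hr1 : IsRoot p r1) (hr2 : IsRoot p r2) (hne12 : r1 ≠ r2) {x : Int}
    (hx : RootsTo p x r1) : RootsTo (p.insert r1 r2) x r2 := by
  have hroot2 : IsRoot (p.insert r1 r2) r2 := by
    rw [IsRoot, pget_attach, if_neg (Ne.symm hne12)]; exact hr2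
  obtain ⟨n, hn, -⟩ := hx
  induction n generalizing x with
  | zero =>
    simp only [Function.iterate_zero, id_eq] at hn
    subst hn
    apply rootsTo_step
    rw [pget_attach, if_pos rfl]
    exact ⟨0, rfl, hroot2⟩
  | succ n ih =>
    by_cases hxr : x = r1
    · subst hxr
      apply rootsTo_step
      rw [pget_attach, if_pos rfl]
      exact ⟨0, rfl, hroot2⟩
    · apply rootsTo_step
      rw [pget_attach, if_neg hxr]
      exact ih (by rw [← Function.iterate_succ_apply]; exact hn)

theorem rootsTo_attach {p : PySem.Dict Int Int} {r1 r2 : Int}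
    (hr1 : IsRoot p r1) (hr2 : IsRoot p r2) (hne12 : r1 ≠ r2) {x r : Int}
    (hx : RootsTo p x r) :
    RootsTo (p.insert r1 r2) x (if r = r1 then r2 else r) := by
  by_cases h : r = r1
  · subst h; rw [if_pos rfl]; exact rootsTo_attach_r1 hr1 hr2 hne12 hx
  · rw [if_neg h]; exact rootsTo_attach_ne hr1 hx h

theorem noCycle_attach {p : PySem.Dict Int Int} {r1 r2 : Int}
    (hnc : NoCycle p) (hv : ValsKeys p)
    (hr1 : IsRoot p r1) (hr2 : IsRoot p r2) (hne12 : r1 ≠ r2) :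
    NoCycle (p.insert r1 r2) := by
  apply noCycle_of_rooted
  intro x
  obtain ⟨r, hr⟩ := rootsTo_total hnc hv x
  exact ⟨_, rootsTo_attach hr1 hr2 hne12 hr⟩

theorem valsKeys_attach {p : PySem.Dict Int Int} {r1 r2 : Int}
    (hv : ValsKeys p) (h1 : r1 ∈ p.keys) (h2 : r2 ∈ p.keys) :
    ValsKeys (p.insert r1 r2) := by
  intro k hk
  rw [keys_attach h1] at hk ⊢
  rw [pget_attach]
  split
  · exact h2
  · exact hv _ hk

theorem rootsTo_mem_keys {p : PySem.Dict Int Int} (hv : ValsKeys p) {k r : Int}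
    (hk : k ∈ p.keys) (h : RootsTo p k r) : r ∈ p.keys := by
  obtain ⟨n, hn, -⟩ := h
  rw [← hn]; exact iter_mem_keys hv hk n

-- ===== relabeling (B side) =====
theorem get?_mk_map {g : Int → Int} : ∀ (l : List (Int × Int)) (k : Int),
    (PySem.Dict.mk (l.map (fun kv => (kv.1, g kv.2)))).get? k
      = ((PySem.Dict.mk l : PySem.Dict Int Int).get? k).map g := by
  intro l
  induction l with
  | nil => intro k; rfl
  | cons kv rest ih =>
    rcases kv with ⟨k0, v0⟩
    intro k
    simp only [List.map_cons, PySem.Dict.get?_mk_cons]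
    by_cases h : (k0 == k) = true
    · simp [h]
    · simp only [h, Bool.false_eq_true, if_false]
      exact ih k

theorem relabel_get? (lab : PySem.Dict Int Int) (a b k : Int) :
    (pvRelabel lab a b).get? k = (lab.get? k).map (fun v => if v = a then b else v) := by
  cases lab with
  | mk items =>
    rw [pvRelabel]
    exact get?_mk_map (g := fun v => if v = a then b else v) items k

theorem relabel_keys (lab : PySem.Dict Int Int) (a b : Int) :
    (pvRelabel lab a b).keys = lab.keys := by
  simp [pvRelabel, PySem.Dict.keys, List.map_map, Function.comp_def]

theorem relabel_values (lab : PySem.Dict Int Int) (a b : Int) :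
    (pvRelabel lab a b).values = lab.values.map (fun v => if v = a then b else v) := by
  simp [pvRelabel, PySem.Dict.values, List.map_map, Function.comp_def]

theorem mem_keys_get? {lab : PySem.Dict Int Int} {k : Int} (h : k ∈ lab.keys) :
    ∃ v, lab.get? k = some v := by
  cases hg : lab.get? k with
  | none => exact absurd h ((PySem.Dict.get?_eq_none_iff_not_mem_keys lab k).1 hg)
  | some v => exact ⟨v, rfl⟩

theorem relabel_getD {lab : PySem.Dict Int Int} {k : Int} (h : k ∈ lab.keys) (a b : Int) :
    (pvRelabel lab a b).getD k 0 = if lab.getD k 0 = a then b else lab.getD k 0 := by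
  obtain ⟨v, hv⟩ := mem_keys_get? h
  rw [PySem.Dict.getD_eq_get?_getD, relabel_get?, hv,
      PySem.Dict.getD_eq_get?_getD, hv]
  rfl

theorem getD_mem_values {lab : PySem.Dict Int Int} {k : Int}
    (h : k ∈ lab.keys) (hnd : lab.keys.Nodup) (d0 : Int) :
    lab.getD k d0 ∈ lab.values := by
  obtain ⟨v, hv⟩ := mem_keys_get? h
  have hmem := PySem.Dict.mem_items_of_get?_eq_some lab hv
  rw [PySem.Dict.getD_of_mem_items lab hmem hnd]
  simp only [PySem.Dict.values]
  exact List.mem_map.2 ⟨(k, v), hmem, rfl⟩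

-- ===== counting distinct labels =====
theorem image_swap_eq_erase {s : Finset Int} {a b : Int}
    (hb : b ∈ s) (hne : a ≠ b) :
    s.image (fun v => if v = a then b else v) = s.erase a := by
  ext x
  simp only [Finset.mem_image, Finset.mem_erase]
  constructor
  · rintro ⟨v, hv, rfl⟩
    split
    · exact ⟨Ne.symm hne, hb⟩
    · next h => exact ⟨h, hv⟩
  · rintro ⟨hxa, hx⟩
    exact ⟨x, hx, by rw [if_neg hxa]⟩

theorem card_toFinset_map_swap {l : List Int} {a b : Int}
    (ha : a ∈ l) (hb : b ∈ l) (hne : a ≠ b) :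
    (l.map (fun v => if v = a then b else v)).toFinset.card = l.toFinset.card - 1 := by
  have hmap : (l.map (fun v => if v = a then b else v)).toFinset
      = l.toFinset.image (fun v => if v = a then b else v) := by
    ext x; simp
  rw [hmap, image_swap_eq_erase (List.mem_toFinset.2 hb) hne,
      Finset.card_erase_of_mem (List.mem_toFinset.2 ha)]

theorem setOfList_length_eq_card (l : List Int) :
    ((PySem.Set.ofList l : List Int).length : Int) = (l.toFinset.card : Int) := by
  congr 1
  have hnd : (PySem.Set.ofList l : List Int).Nodup := PySem.Set.nodup_ofList l
  have hmem : ∀ x, x ∈ (PySem.Set.ofList l : List Int) ↔ x ∈ l := fun x => PySem.Set.mem_ofList l x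
  have : (PySem.Set.ofList l : List Int).toFinset = l.toFinset := by
    ext x; simp [List.mem_toFinset, hmem]
  rw [← this, List.toFinset_card_of_nodup hnd]

-- ===== the simulation invariant =====
def pvInv (p : PySem.Dict Int Int) (size : Int) (lab : PySem.Dict Int Int) (fresh : Int) : Prop :=
  NoCycle p ∧ ValsKeys p ∧ p.keys = lab.keys ∧ lab.keys.Nodup ∧
  (∀ x ∈ p.keys, ∀ y ∈ p.keys, (SameRoot p x y ↔ lab.getD x 0 = lab.getD y 0)) ∧
  size = (lab.values.toFinset.card : Int) ∧
  (∀ v ∈ lab.values, v < fresh)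

theorem inv_init : pvInv PySem.Dict.empty 0 PySem.Dict.empty 0 := by
  refine ⟨?_, ?_, rfl, ?_, ?_, ?_, ?_⟩
  · intro k n _ _
    simp [IsRoot, pvPget, PySem.Dict.getD_empty]
  · intro k hk; simp [PySem.Dict.keys_empty] at hk
  · simp [PySem.Dict.keys_empty]
  · intro x hx; simp [PySem.Dict.keys_empty] at hx
  · simp [PySem.Dict.values, PySem.Dict.empty]
  · intro v hv; simp [PySem.Dict.values, PySem.Dict.empty] at hv

-- add step: A's uf.add(num) paired with B's first-seen labeling
theorem inv_add {p lab : PySem.Dict Int Int} {size fresh : Int}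
    (hI : pvInv p size lab fresh) (num : Int) :
    pvInv (pvAdd (p, size) num).1 (pvAdd (p, size) num).2
      (if ¬ lab.contains num then (lab.insert num fresh, fresh + 1)
       else (lab, fresh)).1
      (if ¬ lab.contains num then (lab.insert num fresh, fresh + 1)
       else (lab, fresh)).2 := by
  obtain ⟨hnc, hv, hkeys, hnd, hpart, hsize, hlt⟩ := hI
  have hcontains : p.contains num = lab.contains num := by
    cases hc : lab.contains num
    · cases hc' : p.contains num
      · rfl
      · exfalso
        have := (PySem.Dict.contains_iff_mem_keys p num).1 hc'
        rw [hkeys] at this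
        rw [(PySem.Dict.contains_iff_mem_keys lab num).2 this] at hc
        exact Bool.noConfusion hc
    · exact (PySem.Dict.contains_iff_mem_keys p num).2
        (by rw [hkeys]; exact (PySem.Dict.contains_iff_mem_keys lab num).1 hc)
  rw [pvAdd, hcontains]
  by_cases hc : lab.contains num
  · simp only [hc, not_true_eq_false, if_false]
    exact ⟨hnc, hv, hkeys, hnd, hpart, hsize, hlt⟩
  · have hcf : lab.contains num = false := by
      cases h : lab.contains num
      · rfl
      · exact absurd h hc
    have hnum : num ∉ p.keys := by
      rw [hkeys]
      intro hmem
      exact hc ((PySem.Dict.contains_iff_mem_keys lab num).2 hmem)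
    have hpcf : p.contains num = false := by rw [hcontains]; exact hcf
    simp only [hcf, Bool.false_eq_true, not_false_eq_true, if_true]
    -- pget of the new dict is extensionally pget of the old one
    have hpg : ∀ x, pvPget (p.insert num num) x = pvPget p x := by
      intro x
      rw [pvPget, PySem.Dict.getD_insert]
      split
      · next hx => subst hx; exact (pget_not_mem hnum).symm
      · rfl
    have hpgf : pvPget (p.insert num num) = pvPget p := funext hpg
    have hkeys' : (p.insert num num).keys = p.keys ++ [num] :=
      PySem.Dict.keys_insert_of_not_contains p num hpcf
    have hlabkeys' : (lab.insert num fresh).keys = lab.keys ++ [num] :=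
      PySem.Dict.keys_insert_of_not_contains lab fresh hcf
    have hRt : ∀ x r, RootsTo (p.insert num num) x r ↔ RootsTo p x r := by
      intro x r; rw [RootsTo, RootsTo, IsRoot, IsRoot, hpgf]
    have hSr : ∀ x y, SameRoot (p.insert num num) x y ↔ SameRoot p x y := by
      intro x y
      unfold SameRoot
      exact exists_congr (fun r => and_congr (hRt x r) (hRt y r))
    have hrootnum : RootsTo p num num := ⟨0, rfl, by rw [IsRoot, pget_not_mem hnum]⟩
    refine ⟨?_, ?_, ?_, ?_, ?_, ?_, ?_⟩
    · intro k n hn hcyc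
      rw [IsRoot, hpgf] at *
      rw [hpgf] at hcyc
      exact hnc k n hn hcyc
    · intro k hk
      rw [hkeys'] at hk ⊢
      rw [hpgf]
      rcases List.mem_append.1 hk with h | h
      · exact List.mem_append.2 (Or.inl (hv _ h))
      · simp only [List.mem_singleton] at h
        subst h
        rw [pget_not_mem hnum]
        simp
    · rw [hkeys', hlabkeys', hkeys]
    · rw [hlabkeys']
      refine List.nodup_append.2 ⟨hnd, List.nodup_singleton _, ?_⟩
      intro x hx b hb
      simp only [List.mem_singleton] at hb
      subst hb
      intro hxb
      rw [hxb] at hx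
      exact hc ((PySem.Dict.contains_iff_mem_keys lab b).2 hx)
    · -- partition correspondence
      intro x hx y hy
      rw [hkeys'] at hx hy
      have hgetD : ∀ z, z ∈ p.keys ∨ z = num →
          (lab.insert num fresh).getD z 0 = if z = num then fresh else lab.getD z 0 := by
        intro z _
        rw [PySem.Dict.getD_insert]
      have hfreshval : ∀ z ∈ p.keys, lab.getD z 0 ≠ fresh := by
        intro z hz heq
        have : lab.getD z 0 ∈ lab.values :=
          getD_mem_values (by rw [← hkeys]; exact hz) hnd 0
        have := hlt _ this
        omega
      have hrootold : ∀ z ∈ p.keys, ∀ r, RootsTo p z r → r ≠ num := by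
        intro z hz r hr heq
        subst heq
        exact hnum (rootsTo_mem_keys hv hz hr)
      rw [hSr]
      rcases List.mem_append.1 hx with hx' | hx' <;> rcases List.mem_append.1 hy with hy' | hy'
      · rw [hgetD x (Or.inl hx'), hgetD y (Or.inl hy')]
        have hxn : x ≠ num := fun h => hnum (h ▸ hx')
        have hyn : y ≠ num := fun h => hnum (h ▸ hy')
        rw [if_neg hxn, if_neg hyn]
        exact hpart x hx' y hy'
      · -- y = num, x old
        simp only [List.mem_singleton] at hy'
        have hxn : x ≠ num := fun h => hnum (h ▸ hx')
        rw [hy', hgetD x (Or.inl hx'), hgetD num (Or.inr rfl), if_neg hxn, if_pos rfl]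
        constructor
        · rintro ⟨r, hr1, hr2⟩
          have hrn := rootsTo_unique hr2 hrootnum
          rw [hrn] at hr1
          exact ((hrootold x hx' _ hr1) rfl).elim
        · intro h
          exact absurd h (hfreshval x hx')
      · simp only [List.mem_singleton] at hx'
        subst hx'
        have hyn : y ≠ x := fun h => hnum (h ▸ hy')
        rw [hgetD x (Or.inr rfl), hgetD y (Or.inl hy'), if_pos rfl, if_neg hyn]
        constructor
        · rintro ⟨r, hr1, hr2⟩
          have := rootsTo_unique hr1 hrootnum
          subst this
          exact absurd rfl (hrootold y hy' _ hr2)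
        · intro h
          exact absurd h.symm (hfreshval y hy')
      · simp only [List.mem_singleton] at hx' hy'
        rw [hx', hy']
        constructor
        · intro _; rfl
        · intro _; exact ⟨num, hrootnum, hrootnum⟩
    · -- size
      have hvals : (lab.insert num fresh).values = lab.values ++ [fresh] := by
        have := PySem.Dict.items_insert_of_not_contains lab fresh hcf
        simp [PySem.Dict.values, this]
      rw [hvals]
      have : (lab.values ++ [fresh]).toFinset = insert fresh lab.values.toFinset := by
        ext x; simp
      rw [this, Finset.card_insert_of_notMem]
      · push_cast
        omega
      · intro hmem
        have := hlt _ (List.mem_toFinset.1 hmem)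
        omega
    · intro v hv'
      have hvals : (lab.insert num fresh).values = lab.values ++ [fresh] := by
        have := PySem.Dict.items_insert_of_not_contains lab fresh hcf
        simp [PySem.Dict.values, this]
      rw [hvals] at hv'
      rcases List.mem_append.1 hv' with h | h
      · have := hlt _ h; omega
      · simp only [List.mem_singleton] at h; omega


-- union step: A's uf.union(k1, k2) paired with B's label merge
theorem inv_union {p lab : PySem.Dict Int Int} {size fresh : Int}
    (hI : pvInv p size lab fresh) {k1 k2 : Int} (h1 : k1 ∈ p.keys) (h2 : k2 ∈ p.keys) :
    pvInv (pvUnion (p, size) k1 k2).1 (pvUnion (p, size) k1 k2).2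
      (if lab.getD k1 0 ≠ lab.getD k2 0
        then pvRelabel lab (lab.getD k1 0) (lab.getD k2 0) else lab) fresh ∧
    (pvUnion (p, size) k1 k2).1.keys = p.keys := by
  obtain ⟨hnc, hv, hkeys, hnd, hpart, hsize, hlt⟩ := hI
  obtain ⟨hk1r, hkeys1, hnc1, hv1, hiff1⟩ := find_spec p k1 hnc hv
  obtain ⟨hk2r, hkeys2, hnc2, hv2, hiff2⟩ := find_spec (pvFind p k1).1 k2 hnc1 hv1
  set q := (pvFind (pvFind p k1).1 k2).1 with hq
  set r1 := (pvFind p k1).2 with hr1def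
  set r2 := (pvFind (pvFind p k1).1 k2).2 with hr2def
  set a := lab.getD k1 0 with hadef
  set b := lab.getD k2 0 with hbdef
  have hkeysq : q.keys = p.keys := by rw [hkeys2, hkeys1]
  have hiffq : ∀ x s, RootsTo q x s ↔ RootsTo p x s := by
    intro x s; rw [hiff2, hiff1]
  have hk2p : RootsTo p k2 r2 := (hiff1 _ _).1 hk2r
  have hk1q : RootsTo q k1 r1 := (hiffq _ _).2 hk1r
  have hk2q : RootsTo q k2 r2 := (hiffq _ _).2 hk2p
  have hsrq : ∀ x y, SameRoot q x y ↔ SameRoot p x y := by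
    intro x y
    exact exists_congr (fun r => and_congr (hiffq x r) (hiffq y r))
  have hab : (r1 = r2) ↔ (a = b) := by
    rw [← sameRoot_iff_of_rootsTo hk1r hk2p]
    exact hpart k1 h1 k2 h2
  have hgoal : pvUnion (p, size) k1 k2
      = if r1 ≠ r2 then (q.insert r1 r2, size - 1) else (q, size) := rfl
  by_cases hne : r1 = r2
  · -- roots equal: nothing changes on either side
    have habeq : a = b := hab.1 hne
    rw [hgoal, if_neg (not_not_intro hne), if_neg (not_not_intro habeq)]
    refine ⟨⟨hnc2, hv2, ?_, hnd, ?_, hsize, hlt⟩, hkeysq⟩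
    · rw [hkeysq, hkeys]
    · intro x hx y hy
      rw [hkeysq] at hx hy
      rw [hsrq]
      exact hpart x hx y hy
  · have habne : a ≠ b := fun h => hne (hab.2 h)
    rw [hgoal, if_pos hne, if_pos habne]
    have hroot1 : IsRoot q r1 := hk1q.choose_spec.2
    have hroot2 : IsRoot q r2 := hk2q.choose_spec.2
    have hk1qmem : k1 ∈ q.keys := by rw [hkeysq]; exact h1
    have hk2qmem : k2 ∈ q.keys := by rw [hkeysq]; exact h2
    have hr1mem : r1 ∈ q.keys := rootsTo_mem_keys hv2 hk1qmem hk1q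
    have hr2mem : r2 ∈ q.keys := rootsTo_mem_keys hv2 hk2qmem hk2q
    have hamem : a ∈ lab.values := getD_mem_values (hkeys ▸ h1) hnd 0
    have hbmem : b ∈ lab.values := getD_mem_values (hkeys ▸ h2) hnd 0
    refine ⟨⟨noCycle_attach hnc2 hv2 hroot1 hroot2 hne,
            valsKeys_attach hv2 hr1mem hr2mem, ?_, ?_, ?_, ?_, ?_⟩, ?_⟩
    · rw [keys_attach hr1mem, relabel_keys, hkeysq, hkeys]
    · rw [relabel_keys]; exact hnd
    · -- partition correspondence
      intro x hx y hy
      rw [keys_attach hr1mem, hkeysq] at hx hy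
      obtain ⟨rx, hrx⟩ := rootsTo_total hnc2 hv2 x
      obtain ⟨ry, hry⟩ := rootsTo_total hnc2 hv2 y
      have hgx := rootsTo_attach hroot1 hroot2 hne hrx
      have hgy := rootsTo_attach hroot1 hroot2 hne hry
      rw [sameRoot_iff_of_rootsTo hgx hgy,
          relabel_getD (show x ∈ lab.keys from hkeys ▸ hx) a b,
          relabel_getD (show y ∈ lab.keys from hkeys ▸ hy) a b]
      have hxa : rx = r1 ↔ lab.getD x 0 = a := by
        rw [← sameRoot_iff_of_rootsTo hrx hk1q, hsrq]
        exact hpart x hx k1 h1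
      have hya : ry = r1 ↔ lab.getD y 0 = a := by
        rw [← sameRoot_iff_of_rootsTo hry hk1q, hsrq]
        exact hpart y hy k1 h1
      have hxb : rx = r2 ↔ lab.getD x 0 = b := by
        rw [← sameRoot_iff_of_rootsTo hrx hk2q, hsrq]
        exact hpart x hx k2 h2
      have hyb : ry = r2 ↔ lab.getD y 0 = b := by
        rw [← sameRoot_iff_of_rootsTo hry hk2q, hsrq]
        exact hpart y hy k2 h2
      have hxy : rx = ry ↔ lab.getD x 0 = lab.getD y 0 := by
        rw [← sameRoot_iff_of_rootsTo hrx hry, hsrq]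
        exact hpart x hx y hy
      by_cases hca : lab.getD x 0 = a
      · have hrxr1 : rx = r1 := hxa.2 hca
        by_cases hcb : lab.getD y 0 = a
        · have hryr1 : ry = r1 := hya.2 hcb
          rw [if_pos hrxr1, if_pos hryr1, if_pos hca, if_pos hcb]
          simp
        · have hryne : ry ≠ r1 := fun h => hcb (hya.1 h)
          rw [if_pos hrxr1, if_neg hryne, if_pos hca, if_neg hcb]
          constructor
          · intro h; exact (hyb.1 h.symm).symm
          · intro h; exact (hyb.2 h.symm).symm
      · have hrxne : rx ≠ r1 := fun h => hca (hxa.1 h)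
        by_cases hcb : lab.getD y 0 = a
        · have hryr1 : ry = r1 := hya.2 hcb
          rw [if_neg hrxne, if_pos hryr1, if_neg hca, if_pos hcb]
          constructor
          · intro h; exact hxb.1 h
          · intro h; exact hxb.2 h
        · have hryne : ry ≠ r1 := fun h => hcb (hya.1 h)
          rw [if_neg hrxne, if_neg hryne, if_neg hca, if_neg hcb]
          exact hxy
    · -- size
      rw [relabel_values, card_toFinset_map_swap hamem hbmem habne]
      have hpos : 0 < lab.values.toFinset.card :=
        Finset.card_pos.2 ⟨a, List.mem_toFinset.2 hamem⟩
      omega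
    · intro v hv'
      rw [relabel_values] at hv'
      obtain ⟨w, hw, rfl⟩ := List.mem_map.1 hv'
      by_cases hwa : w = a
      · rw [if_pos hwa]; exact hlt _ hbmem
      · rw [if_neg hwa]; exact hlt _ hw
    · rw [keys_attach hr1mem, hkeysq]


-- ===== folding the invariant through the loops =====
theorem add_keys {st : PySem.Dict Int Int × Int} {num : Int} :
    st.1.keys ⊆ (pvAdd st num).1.keys ∧ num ∈ (pvAdd st num).1.keys := by
  rw [pvAdd]
  by_cases hc : st.1.contains num
  · simp only [hc, not_true_eq_false, if_false]
    exact ⟨fun x hx => hx, (PySem.Dict.contains_iff_mem_keys _ _).1 hc⟩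
  · have hcf : st.1.contains num = false := by
      cases h : st.1.contains num
      · rfl
      · exact absurd h hc
    simp only [hcf, Bool.false_eq_true, not_false_eq_true, if_true]
    rw [PySem.Dict.keys_insert_of_not_contains _ _ hcf]
    constructor
    · intro x hx; exact List.mem_append.2 (Or.inl hx)
    · exact List.mem_append.2 (Or.inr (List.mem_singleton.2 rfl))

theorem inv_addFold : ∀ (nums : List Int) (stA stB : PySem.Dict Int Int × Int),
    pvInv stA.1 stA.2 stB.1 stB.2 →
    pvInv (nums.foldl pvAdd stA).1 (nums.foldl pvAdd stA).2
      (nums.foldl (fun st num =>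
        if ¬ st.1.contains num then (st.1.insert num st.2, st.2 + 1) else st) stB).1
      (nums.foldl (fun st num =>
        if ¬ st.1.contains num then (st.1.insert num st.2, st.2 + 1) else st) stB).2 ∧
    (∀ x ∈ nums, x ∈ (nums.foldl pvAdd stA).1.keys) ∧
    (∀ x ∈ stA.1.keys, x ∈ (nums.foldl pvAdd stA).1.keys) := by
  intro nums
  induction nums with
  | nil =>
    intro stA stB hI
    exact ⟨hI, fun x hx => absurd hx (List.not_mem_nil), fun x hx => hx⟩
  | cons num rest ih =>
    intro stA stB hI
    have hstep := inv_add (p := stA.1) (size := stA.2) (lab := stB.1) (fresh := stB.2) hI num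
    have hIH := ih (pvAdd stA num)
      (if ¬ stB.1.contains num then (stB.1.insert num stB.2, stB.2 + 1) else stB)
      (by
        rcases stA with ⟨p, size⟩
        rcases stB with ⟨lab, fresh⟩
        by_cases hc : lab.contains num
        · simpa [hc] using hstep
        · simpa [hc] using hstep)
    simp only [List.foldl_cons]
    refine ⟨?_, ?_, ?_⟩
    · exact hIH.1
    · intro x hx
      rcases List.mem_cons.1 hx with h | h
      · subst h
        exact hIH.2.2 _ add_keys.2
      · exact hIH.2.1 x h
    · intro x hx
      exact hIH.2.2 x (add_keys.1 hx)

theorem inv_unionFold (nums : List Int) :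
    ∀ (l : List Int) (stA stB : PySem.Dict Int Int × Int),
    (∀ i ∈ l, 1 ≤ i ∧ i < (nums.length : Int)) →
    pvInv stA.1 stA.2 stB.1 stB.2 →
    (∀ x ∈ nums, x ∈ stA.1.keys) →
    pvInv
      (l.foldl (fun st i =>
        pvUnion st (PySem.List.pyGetD nums i 0) (PySem.List.pyGetD nums (i - 1) 0)) stA).1
      (l.foldl (fun st i =>
        pvUnion st (PySem.List.pyGetD nums i 0) (PySem.List.pyGetD nums (i - 1) 0)) stA).2
      (l.foldl (fun st i =>
        let a := st.1.getD (PySem.List.pyGetD nums i 0) 0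
        let b := st.1.getD (PySem.List.pyGetD nums (i - 1) 0) 0
        if a ≠ b then (pvRelabel st.1 a b, st.2) else st) stB).1
      (l.foldl (fun st i =>
        let a := st.1.getD (PySem.List.pyGetD nums i 0) 0
        let b := st.1.getD (PySem.List.pyGetD nums (i - 1) 0) 0
        if a ≠ b then (pvRelabel st.1 a b, st.2) else st) stB).2 := by
  intro l
  induction l with
  | nil =>
    intro stA stB _ hI _
    exact hI
  | cons i rest ih =>
    intro stA stB hl hI hmem
    have hi := hl i (List.mem_cons_self)
    have hmem1 : PySem.List.pyGetD nums i 0 ∈ nums := by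
      rw [PySem.List.pyGetD_of_nonneg nums 0 (by omega)]
      have hlt : i.toNat < nums.length := by omega
      rw [List.getD_eq_getElem nums 0 hlt]
      exact List.getElem_mem hlt
    have hmem2 : PySem.List.pyGetD nums (i - 1) 0 ∈ nums := by
      rw [PySem.List.pyGetD_of_nonneg nums 0 (by omega)]
      have hlt : (i - 1).toNat < nums.length := by omega
      rw [List.getD_eq_getElem nums 0 hlt]
      exact List.getElem_mem hlt
    rcases stA with ⟨p, size⟩
    rcases stB with ⟨lab, fresh⟩
    have hstep := inv_union (p := p) (lab := lab) (size := size) (fresh := fresh) hI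
      (hmem _ hmem1) (hmem _ hmem2)
    simp only [List.foldl_cons]
    apply ih
    · intro j hj; exact hl j (List.mem_cons_of_mem _ hj)
    · by_cases hc : lab.getD (PySem.List.pyGetD nums i 0) 0
          = lab.getD (PySem.List.pyGetD nums (i - 1) 0) 0
      · simpa [hc] using hstep.1
      · simpa [hc] using hstep.1
    · intro x hx
      rw [hstep.2]
      exact hmem x hx

theorem inv_main : ∀ (sets : List (List Int)) (stA stB : PySem.Dict Int Int × Int),
    pvInv stA.1 stA.2 stB.1 stB.2 →
    pvInv
      (sets.foldl (fun st nums =>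
        let st1 := nums.foldl pvAdd st
        (PySem.List.pyRange 1 (nums.length : Int) 1).foldl
          (fun st i => pvUnion st (PySem.List.pyGetD nums i 0)
            (PySem.List.pyGetD nums (i - 1) 0)) st1) stA).1
      (sets.foldl (fun st nums =>
        let st1 := nums.foldl pvAdd st
        (PySem.List.pyRange 1 (nums.length : Int) 1).foldl
          (fun st i => pvUnion st (PySem.List.pyGetD nums i 0)
            (PySem.List.pyGetD nums (i - 1) 0)) st1) stA).2
      (sets.foldl (fun st nums =>
        let st1 := nums.foldl (fun st num =>
          if ¬ st.1.contains num then (st.1.insert num st.2, st.2 + 1) else st) st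
        (PySem.List.pyRange 1 (nums.length : Int) 1).foldl (fun st i =>
          let a := st.1.getD (PySem.List.pyGetD nums i 0) 0
          let b := st.1.getD (PySem.List.pyGetD nums (i - 1) 0) 0
          if a ≠ b then (pvRelabel st.1 a b, st.2) else st) st1) stB).1
      (sets.foldl (fun st nums =>
        let st1 := nums.foldl (fun st num =>
          if ¬ st.1.contains num then (st.1.insert num st.2, st.2 + 1) else st) st
        (PySem.List.pyRange 1 (nums.length : Int) 1).foldl (fun st i =>
          let a := st.1.getD (PySem.List.pyGetD nums i 0) 0
          let b := st.1.getD (PySem.List.pyGetD nums (i - 1) 0) 0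
          if a ≠ b then (pvRelabel st.1 a b, st.2) else st) st1) stB).2 := by
  intro sets
  induction sets with
  | nil => intro stA stB hI; exact hI
  | cons nums rest ih =>
    intro stA stB hI
    simp only [List.foldl_cons]
    apply ih
    obtain ⟨hI1, hmem, -⟩ := inv_addFold nums stA stB hI
    apply inv_unionFold nums (PySem.List.pyRange 1 (nums.length : Int) 1)
    · intro i hi
      exact PySem.List.mem_pyRange_one.1 hi
    · exact hI1
    · exact hmem


-- ===== VERDICT (by name: the statement is the Claim_ definition above) =====
theorem setUnion_spec : Claim_equal_setUnion := by
  intro sets _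
  exact ((inv_main sets (PySem.Dict.empty, 0) (PySem.Dict.empty, 0) inv_init).2.2.2.2.2.1).trans
    (setOfList_length_eq_card _).symm
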